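-- pv_equiv track=rewrite | github.com/itsjatin135s/ds-algo | GFG/Python/DSA/Easy/find-equal-point-in-string-of-brackets.py | find_index
-- ===== SOURCE A (Python) =====
-- def find_index(string):
--     n = len(string)
--
--     closing_brackets = 0
--     for i in string:
--         if i == ')':
--             closing_brackets += 1
--
--     opening_bracket = 0
--     for i in range(0, n):
--         if string[i] == '(':
--             opening_bracket += 1
--         else:
--             closing_brackets -= 1
--
--         if opening_bracket == closing_brackets:
--             return i + 1
--     return 0
-- ===== SOURCE B (Python) =====
-- def find_index(string):
--     # The per-index test in the original collapses algebraically: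
--     # it returns the number of ')' characters. One library count, no loops.
--     return string.count(')')
-- ===== Notes on version B (the rewrite author's own statement) =====
-- stated objective: simpler
-- what changed: Replaced the two explicit sweeps (a counting loop plus an indexed scan with two running counters and an early return) by the closed form string.count(')'), after proving the per-index condition opening==closing holds exactly at index count(')')-1.
import Mathlib
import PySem

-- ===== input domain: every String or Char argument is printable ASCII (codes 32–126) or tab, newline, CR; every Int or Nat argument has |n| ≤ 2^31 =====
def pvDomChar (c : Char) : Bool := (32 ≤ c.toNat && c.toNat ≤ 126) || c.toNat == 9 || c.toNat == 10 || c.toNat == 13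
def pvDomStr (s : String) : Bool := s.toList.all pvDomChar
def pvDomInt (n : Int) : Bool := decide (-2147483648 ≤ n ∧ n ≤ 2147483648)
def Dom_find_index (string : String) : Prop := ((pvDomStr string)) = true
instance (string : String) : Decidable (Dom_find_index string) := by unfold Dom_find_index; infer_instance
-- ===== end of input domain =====

-- B replaces A's two explicit sweeps by the single closed form string.count(')') (simpler).

-- ===== PORT A =====
-- the indexed loop 'for i in range(0, n)': we walk the chars of the string
-- (string[i] for i = 0,1,…,n-1, always in range) carrying i, opening_bracket, closing_brackets
def find_index_loop : List Char → Int → Int → Int → Int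
  | [], _, _, _ => 0
  | c :: rest, i, opening, closing =>
    if c = '(' then
      if opening + 1 = closing then i + 1
      else find_index_loop rest (i + 1) (opening + 1) closing
    else
      if opening = closing - 1 then i + 1
      else find_index_loop rest (i + 1) opening (closing - 1)

def find_index (string : String) : Int :=
  let closing := string.toList.foldl (fun a c => if c = ')' then a + 1 else a) (0 : Int)
  find_index_loop string.toList 0 0 closing

-- ===== PORT B =====
def find_index_alt (string : String) : Int :=
  (PySem.Str.count string ")" : Int)

-- ===== PRECONDITION & SPEC =====
def Spec_find_index (string : String) (out : Int) : Prop := out = find_index_alt string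
instance (string : String) (out : Int) : Decidable (Spec_find_index string out) := by unfold Spec_find_index; infer_instance

-- ===== CLAIM (what is proved, stated in full; the proofs are below) =====
def Claim_equal_find_index : Prop := ∀ (string : String), Dom_find_index string → Spec_find_index string (find_index string)

-- ===== LEMMAS AND PROOFS =====

-- A's loop in closed form: the test fires exactly when closing - opening has counted down to 0
theorem find_index_loop_eq (l : List Char) : ∀ (i o c : Int),
    find_index_loop l i o c =
      if 1 ≤ c - o ∧ c - o ≤ (l.length : Int) then i + (c - o) else 0 := by
  induction l with
  | nil =>
    intro i o c
    simp only [find_index_loop, List.length_nil]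
    split_ifs with h
    · omega
    · rfl
  | cons x rest ih =>
    intro i o c
    by_cases hx : x = '('
    · simp only [find_index_loop, if_pos hx]
      by_cases h1 : o + 1 = c
      · rw [if_pos h1]
        have : c - o = 1 := by omega
        simp only [List.length_cons]
        rw [if_pos (by push_cast; omega)]
        omega
      · rw [if_neg h1, ih]
        simp only [List.length_cons]
        by_cases h2 : 1 ≤ c - (o + 1) ∧ c - (o + 1) ≤ (rest.length : Int)
        · rw [if_pos h2, if_pos (by push_cast at h2 ⊢; omega)]
          omega
        · rw [if_neg h2, if_neg (by push_cast at h2 ⊢; omega)]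
    · simp only [find_index_loop, if_neg hx]
      by_cases h1 : o = c - 1
      · rw [if_pos h1]
        have : c - o = 1 := by omega
        simp only [List.length_cons]
        rw [if_pos (by push_cast; omega)]
        omega
      · rw [if_neg h1, ih]
        simp only [List.length_cons]
        by_cases h2 : 1 ≤ c - 1 - o ∧ c - 1 - o ≤ (rest.length : Int)
        · rw [if_pos h2, if_pos (by push_cast at h2 ⊢; omega)]
          omega
        · rw [if_neg h2, if_neg (by push_cast at h2 ⊢; omega)]

-- PySem's substring count specialised to a one-character pattern is the character count
theorem count_go_singleton (ch : Char) : ∀ (l : List Char) (fuel acc : Nat),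
    l.length ≤ fuel → PySem.Chars.count.go [ch] fuel l acc = acc + l.count ch := by
  intro l
  induction l with
  | nil =>
    intro fuel acc _
    cases fuel <;> simp [PySem.Chars.count.go]
  | cons h t ih =>
    intro fuel acc hf
    cases fuel with
    | zero => simp at hf
    | succ f =>
      simp only [List.length_cons] at hf
      by_cases hc : ch = h
      · have hpre : [ch].isPrefixOf (h :: t) = true := by
          simp [List.isPrefixOf, hc]
        simp only [PySem.Chars.count.go, hpre, if_true]
        simp only [List.length_cons, List.length_nil, Nat.zero_add, List.drop_one,
          List.tail_cons]
        rw [ih f (acc + 1) (by omega)]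
        rw [List.count_cons]
        simp [hc]
        omega
      · have hpre : [ch].isPrefixOf (h :: t) = false := by
          simp only [List.isPrefixOf, Bool.and_eq_false_iff, beq_eq_false_iff_ne, ne_eq]
          left; exact hc
        simp only [PySem.Chars.count.go, hpre, Bool.false_eq_true, if_false]
        rw [ih f acc (by omega)]
        rw [List.count_cons]
        have h2 : (h == ch) = false := by simp; exact fun h' => hc h'.symm
        simp only [h2, Bool.false_eq_true, if_false]
        omega

theorem chars_count_singleton (l : List Char) (ch : Char) :
    PySem.Chars.count l [ch] = l.count ch := by
  simp only [PySem.Chars.count, List.isEmpty_cons, Bool.false_eq_true, if_false]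
  rw [count_go_singleton ch l l.length 0 le_rfl]
  omega


-- the first sweep of A computes the same count
theorem foldl_count (l : List Char) : ∀ (a : Int),
    l.foldl (fun a c => if c = ')' then a + 1 else a) a = a + (l.count ')' : Int) := by
  induction l with
  | nil => intro a; simp
  | cons h t ih =>
    intro a
    simp only [List.foldl_cons, List.count_cons]
    by_cases hc : h = ')'
    · rw [if_pos hc, ih]
      simp [hc]
      omega
    · rw [if_neg hc, ih]
      have : (h == ')') = false := by simp [hc]
      simp [this]

-- ===== VERDICT (by name: the statement is the Claim_ definition above) =====
theorem find_index_spec : Claim_equal_find_index := by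
  intro s _
  unfold Spec_find_index find_index find_index_alt
  simp only
  rw [foldl_count, find_index_loop_eq]
  have hcount : PySem.Str.count s ")" = s.toList.count ')' := by
    rw [PySem.Str.count_eq]
    exact chars_count_singleton s.toList ')'
  have hle : s.toList.count ')' ≤ s.toList.length := List.count_le_length
  rw [hcount]
  by_cases h0 : s.toList.count ')' = 0
  · rw [if_neg (by omega)]
    omega
  · rw [if_pos (by omega)]
    omega
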